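-- pv_equiv track=rewrite | github.com/jhandross/PQ-Excel_BI_Challenges | Excel_Challenge_779 - Linked_in_Block_Shift.py | cycles_and_order
-- ===== SOURCE A (Python) =====
-- import math
--
-- def cycles_and_order(p):
--     n = len(p)
--     seen = [False]*n
--     lens = []
--     for i in range(n):
--         if not seen[i]:
--             j = i
--             L = 0
--             while not seen[j]:
--                 seen[j] = True
--                 j = p[j]
--                 L += 1
--             if L > 1:
--                 lens.append(L)
--     order = math.lcm(*lens) if lens else 1
--     return lens, order
-- ===== SOURCE B (Python) =====
-- import math
--
-- def cycles_and_order(p):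
--     n = len(p)
--     m = list(range(n))          # m[c]: smallest start index whose walk reaches cell c, so far
--     for j in range(n):
--         x = j
--         visited = set()
--         while x not in visited:  # walk from j until the path closes on itself
--             visited.add(x)
--             if j < m[x]:
--                 m[x] = j
--             x = p[x]
--     cnt = [0] * n
--     for c in range(n):
--         cnt[m[c]] += 1           # size of the group first discovered from each start
--     lens = [c for c in cnt if c > 1]
--     return lens, math.lcm(*lens) if lens else 1
-- ===== Notes on version B (the rewrite author's own statement) =====
-- stated objective: alternative
-- what changed: Instead of A's single pass that marks cells in a seen-array and appends each walk's length on the fly, B computes for every cell the smallest start index whose walk reaches it (a min-reach labeling built by per-start walks into a fresh visited set), then histograms those labels and filters counts > 1.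
import Mathlib
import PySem

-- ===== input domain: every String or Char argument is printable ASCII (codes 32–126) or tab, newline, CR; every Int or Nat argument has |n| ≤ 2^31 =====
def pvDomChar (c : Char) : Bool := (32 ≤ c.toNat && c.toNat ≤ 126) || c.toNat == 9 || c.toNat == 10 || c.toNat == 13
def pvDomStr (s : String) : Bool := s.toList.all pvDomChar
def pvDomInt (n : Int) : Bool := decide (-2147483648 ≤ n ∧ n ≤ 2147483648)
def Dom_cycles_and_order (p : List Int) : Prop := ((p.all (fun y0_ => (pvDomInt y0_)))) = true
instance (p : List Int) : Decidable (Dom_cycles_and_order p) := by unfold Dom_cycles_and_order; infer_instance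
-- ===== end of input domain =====

-- B replaces A's single seen-marking pass by a min-reach labeling (per-start walks into a
-- visited set) followed by a histogram; objective: alternative (not faster).

-- ===== PORT A =====
-- math.lcm(*lens): Python's n-ary lcm = binary lcm folded from identity 1 (exact for all ints)
def pyMathLcm (lens : List Int) : Int := lens.foldl (fun a x => (Int.lcm a x : Int)) 1

-- the inner 'while not seen[j]' loop of A; fuel n+1 always suffices (each iteration marks a
-- fresh index), proved in pyA_walk_spec below
def pyA_walk (p : List Int) (fuel : Nat) (seen : List Bool) (j L : Int) : List Bool × Int × Int :=
  match fuel with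
  | 0 => (seen, j, L)
  | fuel+1 =>
    match PySem.List.pyGet? seen j with
    | none => (seen, j, L)          -- IndexError (excluded by Pre_)
    | some b =>
      if b then (seen, j, L)
      else
        let seen' := PySem.List.pySetD seen j true   -- seen[j] = True
        match PySem.List.pyGet? p j with
        | none => (seen', j, L)      -- IndexError (excluded by Pre_)
        | some v => pyA_walk p fuel seen' v (L + 1)

def cycles_and_order (p : List Int) : List Int × Int :=
  let n := p.length
  let st := (PySem.List.pyRange 0 (n : Int) 1).foldl (fun st i =>
    match PySem.List.pyGet? st.1 i with
    | none => st                     -- unreachable: i < len(seen)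
    | some b =>
      if b then st
      else
        let w := pyA_walk p (n + 1) st.1 i 0
        (w.1, if w.2.2 > 1 then st.2 ++ [w.2.2] else st.2)
    ) (List.replicate n false, ([] : List Int))
  (st.2, if st.2 = [] then 1 else pyMathLcm st.2)

-- ===== PORT B =====
-- the inner 'while x not in visited' walk of B; fuel n+2 always suffices (a value repeats
-- within n+2 steps), proved in pyB_walk_spec below
def pyB_walk (p : List Int) (fuel : Nat) (visited : PySem.Set Int) (m : List Int)
    (j x : Int) : List Int :=
  match fuel with
  | 0 => m
  | fuel+1 =>
    if PySem.Set.contains visited x then m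
    else
      let visited' := PySem.Set.add visited x
      let m' := if j < PySem.List.pyGetD m x 0 then PySem.List.pySetD m x j else m
      match PySem.List.pyGet? p x with
      | none => m'                   -- IndexError (excluded by Pre_)
      | some v => pyB_walk p fuel visited' m' j v

def cycles_and_order_alt (p : List Int) : List Int × Int :=
  let n := p.length
  let m0 : List Int := PySem.List.pyRange 0 (n : Int) 1   -- m = list(range(n))
  let m := (PySem.List.pyRange 0 (n : Int) 1).foldl
    (fun m j => pyB_walk p (n + 2) PySem.Set.empty m j j) m0
  let cnt := (PySem.List.pyRange 0 (n : Int) 1).foldl (fun cnt c =>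
      let mc := PySem.List.pyGetD m c 0
      PySem.List.pySetD cnt mc (PySem.List.pyGetD cnt mc 0 + 1)   -- cnt[m[c]] += 1
    ) (List.replicate n (0 : Int))
  let lens := cnt.filter (fun c => c > 1)
  (lens, if lens = [] then 1 else pyMathLcm lens)

-- ===== PRECONDITION & SPEC =====
-- Exactly the inputs on which the Python A returns: A eventually reads p[x] for every index x,
-- so it raises IndexError iff some element lies outside [-len(p), len(p)).
def Pre_cycles_and_order (p : List Int) : Prop :=
  ∀ v ∈ p, -(p.length : Int) ≤ v ∧ v < (p.length : Int)
instance (p : List Int) : Decidable (Pre_cycles_and_order p) := by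
  unfold Pre_cycles_and_order; infer_instance
def pvWitness_cycles_and_order : List Int := [2, 0, -2]
def Spec_cycles_and_order (p : List Int) (out : List Int × Int) : Prop := out = cycles_and_order_alt p
instance (p : List Int) (out : List Int × Int) : Decidable (Spec_cycles_and_order p out) := by
  unfold Spec_cycles_and_order; infer_instance

-- ===== CLAIM (what is proved, stated in full; the proofs are below) =====
def Claim_equal_cycles_and_order : Prop := ∀ (p : List Int), Dom_cycles_and_order p → Pre_cycles_and_order p → Spec_cycles_and_order p (cycles_and_order p)

-- ===== LEMMAS AND PROOFS =====

-- The common mathematical skeleton: pvF is the successor map c ↦ p[c] on cell indices (Python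
-- index semantics: negative entries address from the end), pvMs y the least start index whose
-- walk reaches cell y, pvC i the size of the group whose least reacher is i.  A's lens and B's
-- lens are both shown equal to pvLens p n.
def pvF (p : List Int) (x : Nat) : Nat := (PySem.Int.mod (p.getD x 0) (p.length : Int)).toNat

def pvBReach (p : List Int) (j y : Nat) : Bool := decide (∃ k < p.length, (pvF p)^[k] j = y)

def pvReach (p : List Int) (j y : Nat) : Prop := ∃ k, (pvF p)^[k] j = y

def pvMs (p : List Int) (y : Nat) : Nat :=
  Nat.find (show ∃ j, pvBReach p j y = true ∨ y ≤ j from ⟨y, Or.inr le_rfl⟩)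

def pvC (p : List Int) (i : Nat) : Nat :=
  ((List.range p.length).filter (fun x => pvMs p x = i)).length

def pvLens (p : List Int) (m : Nat) : List Int :=
  ((List.range m).map (fun i => (pvC p i : Int))).filter (fun c => c > 1)

-- stopping time of A's walk started at i: first t whose cell is already marked
def pvStop (p : List Int) (i t : Nat) : Bool :=
  decide (pvMs p ((pvF p)^[t] i) < i) || decide (∃ s < t, (pvF p)^[s] i = (pvF p)^[t] i)

def pvT (p : List Int) (i : Nat) : Nat :=
  Nat.find (show ∃ t, pvStop p i t = true ∨ p.length + 1 ≤ t from ⟨p.length + 1, Or.inr le_rfl⟩)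

-- the sequence of raw Int values B's walk from j runs through (cell of pvX t is (pvF)^[t] j)
def pvX (p : List Int) (j : Nat) : Nat → Int
  | 0 => ((j : Nat) : Int)
  | t+1 => p.getD ((pvF p)^[t] j) 0

-- first-repeat time of that raw-value sequence = B's stopping time
def pvTB (p : List Int) (j : Nat) : Nat :=
  Nat.find (show ∃ t, decide (∃ s < t, pvX p j s = pvX p j t) = true ∨ p.length + 2 ≤ t
    from ⟨p.length + 2, Or.inr le_rfl⟩)

lemma pvMod_inrange (v : Int) (n : Nat) (hn : 0 < n) (h1 : -(n : Int) ≤ v) (h2 : v < (n : Int)) :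
    PySem.Int.mod v (n : Int) = if v < 0 then v + n else v := by
  have hb : (0:Int) < n := by exact_mod_cast hn
  show v.fmod n = _
  rw [Int.fmod_eq_emod_of_nonneg v hb.le]
  split_ifs with hv
  · have h3 : (v + n) % n = v % n := by simp
    rw [← h3, Int.emod_eq_of_lt (by omega) (by omega)]
  · rw [Int.emod_eq_of_lt (by omega) (by omega)]

lemma pvIdx_inrange (n : Nat) (v : Int) (hn : 0 < n) (h1 : -(n : Int) ≤ v) (h2 : v < (n : Int)) :
    PySem.List.pyIdx? n v = some (PySem.Int.mod v (n : Int)).toNat := by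
  rw [pvMod_inrange v n hn h1 h2]
  simp only [PySem.List.pyIdx?]
  split_ifs with h3 h4 h5 <;> try omega
  · simp
  · simp only [Option.some.injEq]; omega

lemma pvMod_bounds (v : Int) (n : Nat) (hn : 0 < n) :
    0 ≤ PySem.Int.mod v (n : Int) ∧ PySem.Int.mod v (n : Int) < n := by
  have hb : (0:Int) < n := by exact_mod_cast hn
  exact ⟨PySem.Int.mod_nonneg v hb, PySem.Int.mod_lt v hb⟩

lemma pvF_lt (p : List Int) (x : Nat) (hn : 0 < p.length) : pvF p x < p.length := by
  have := pvMod_bounds (p.getD x 0) p.length hn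
  unfold pvF; omega

lemma pvIter_lt (p : List Int) (j k : Nat) (hn : 0 < p.length) (hj : j < p.length) :
    (pvF p)^[k] j < p.length := by
  cases k with
  | zero => simpa
  | succ k => rw [Function.iterate_succ_apply']; exact pvF_lt p _ hn

lemma pyGet?_inrange {α : Type} (xs : List α) (v : Int) (hn : 0 < xs.length)
    (h1 : -(xs.length : Int) ≤ v) (h2 : v < (xs.length : Int)) :
    PySem.List.pyGet? xs v = xs[(PySem.Int.mod v (xs.length : Int)).toNat]? := by
  show (PySem.List.pyIdx? xs.length v).bind _ = _
  rw [pvIdx_inrange xs.length v hn h1 h2]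
  rfl

lemma pySetD_inrange {α : Type} (xs : List α) (v : Int) (b : α) (hn : 0 < xs.length)
    (h1 : -(xs.length : Int) ≤ v) (h2 : v < (xs.length : Int)) :
    PySem.List.pySetD xs v b = xs.set (PySem.Int.mod v (xs.length : Int)).toNat b := by
  show ((Option.map _ (PySem.List.pyIdx? xs.length v)).getD xs) = _
  rw [pvIdx_inrange xs.length v hn h1 h2]
  rfl

lemma pvRepeat (p : List Int) (j : Nat) (hn : 0 < p.length) (hj : j < p.length) :
    ∃ s t, s < t ∧ t ≤ p.length ∧ (pvF p)^[s] j = (pvF p)^[t] j := by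
  have hlt : ∀ k, (pvF p)^[k] j < p.length := fun k => pvIter_lt p j k hn hj
  have hni : ¬ Function.Injective
      (fun k : Fin (p.length+1) => (⟨(pvF p)^[k.1] j, hlt k.1⟩ : Fin p.length)) := by
    intro hinj
    have := Fintype.card_le_of_injective _ hinj
    simp at this
  rw [Function.not_injective_iff] at hni
  obtain ⟨a, b, hab, hne⟩ := hni
  simp only [Fin.mk.injEq] at hab
  rcases Nat.lt_or_ge a.1 b.1 with h | h
  · exact ⟨a.1, b.1, h, by omega, hab⟩
  · have hba : b.1 < a.1 := by
      rcases Nat.lt_or_ge b.1 a.1 with h' | h'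
      · exact h'
      · exact absurd (Fin.ext (by omega)) hne
    exact ⟨b.1, a.1, hba, by omega, hab.symm⟩

lemma pvPeriodic (p : List Int) (j s t : Nat) (hst : s < t)
    (he : (pvF p)^[s] j = (pvF p)^[t] j) :
    ∀ m, s ≤ m → (pvF p)^[m] j = (pvF p)^[s + (m - s) % (t - s)] j := by
  intro m
  induction m using Nat.strong_induction_on with
  | _ m ih =>
    intro hm
    rcases Nat.lt_or_ge m t with h | h
    · have hmod : (m - s) % (t - s) = m - s := Nat.mod_eq_of_lt (by omega)
      rw [hmod, Nat.add_sub_cancel' hm]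
    · have hm' : m - (t - s) < m := by omega
      have hs' : s ≤ m - (t - s) := by omega
      have step : (pvF p)^[m] j = (pvF p)^[m - (t - s)] j := by
        have h1 : (pvF p)^[m] j = (pvF p)^[m - t] ((pvF p)^[t] j) := by
          rw [← Function.iterate_add_apply]; congr 1; omega
        rw [h1, ← he, ← Function.iterate_add_apply]
        congr 1; omega
      rw [step, ih _ hm' hs']
      congr 2
      have h2 : m - s = (m - (t - s) - s) + (t - s) := by omega
      rw [h2, Nat.add_mod_right]

lemma pvReach_lt_of_repeat (p : List Int) (j y s t : Nat) (hst : s < t)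
    (he : (pvF p)^[s] j = (pvF p)^[t] j) (hr : pvReach p j y) :
    ∃ k < t, (pvF p)^[k] j = y := by
  obtain ⟨k0, hk0⟩ := hr
  rcases Nat.lt_or_ge k0 t with h | h
  · exact ⟨k0, h, hk0⟩
  · have hs : s ≤ k0 := by omega
    have hper := pvPeriodic p j s t hst he k0 hs
    have hmod : (k0 - s) % (t - s) < t - s := Nat.mod_lt _ (by omega)
    exact ⟨s + (k0 - s) % (t - s), by omega, by rw [← hper, hk0]⟩

lemma pvReach_iff (p : List Int) (j y : Nat) (hn : 0 < p.length) (hj : j < p.length) :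
    pvReach p j y ↔ pvBReach p j y = true := by
  constructor
  · intro hr
    obtain ⟨s, t, hst, htn, he⟩ := pvRepeat p j hn hj
    obtain ⟨k, hk, he2⟩ := pvReach_lt_of_repeat p j y s t hst he hr
    simp only [pvBReach, decide_eq_true_eq]
    exact ⟨k, by omega, he2⟩
  · intro h
    simp only [pvBReach, decide_eq_true_eq] at h
    obtain ⟨k, _, hk⟩ := h
    exact ⟨k, hk⟩

lemma pvReach_trans (p : List Int) (a b c : Nat) (h1 : pvReach p a b) (h2 : pvReach p b c) :
    pvReach p a c := by
  obtain ⟨k1, h1⟩ := h1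
  obtain ⟨k2, h2⟩ := h2
  exact ⟨k2 + k1, by rw [Function.iterate_add_apply, h1, h2]⟩

lemma pvMs_le (p : List Int) (y : Nat) : pvMs p y ≤ y := by
  unfold pvMs
  exact Nat.find_le (Or.inr le_rfl)

lemma pvMs_breach (p : List Int) (y : Nat) (hn : 0 < p.length) (hy : y < p.length) :
    pvBReach p (pvMs p y) y = true := by
  have hle := pvMs_le p y
  unfold pvMs at *
  rcases Nat.find_spec (show ∃ j, pvBReach p j y = true ∨ y ≤ j from ⟨y, Or.inr le_rfl⟩) with h | h
  · exact h
  · have hy2 : Nat.find (show ∃ j, pvBReach p j y = true ∨ y ≤ j from ⟨y, Or.inr le_rfl⟩) = y := by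
      omega
    rw [hy2]
    simp only [pvBReach, decide_eq_true_eq]
    exact ⟨0, hn, rfl⟩

lemma pvMs_min (p : List Int) (j y : Nat) (h : pvBReach p j y = true) : pvMs p y ≤ j := by
  unfold pvMs
  exact Nat.find_le (Or.inl h)

lemma pvMs_mono (p : List Int) (j y : Nat) (hn : 0 < p.length) (hj : j < p.length)
    (hr : pvReach p j y) : pvMs p y ≤ pvMs p j := by
  have hj2 : pvMs p j < p.length := lt_of_le_of_lt (pvMs_le p j) hj
  have h1 : pvBReach p (pvMs p j) j = true := pvMs_breach p j hn hj
  have h2 : pvReach p (pvMs p j) j := (pvReach_iff p _ j hn hj2).mpr h1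
  have h3 : pvReach p (pvMs p j) y := pvReach_trans p _ j y h2 hr
  exact pvMs_min p _ y ((pvReach_iff p _ y hn hj2).mp h3)

lemma pvMs_self (p : List Int) (i : Nat) (h : ¬ pvMs p i < i) : pvMs p i = i := by
  have := pvMs_le p i
  omega

lemma pvMs_eq_imp (p : List Int) (x i : Nat) (hn : 0 < p.length) (hx : x < p.length)
    (hi : i < p.length) (h : pvMs p x = i) : pvMs p i = i ∧ pvReach p i x := by
  have hb : pvBReach p i x = true := by rw [← h]; exact pvMs_breach p x hn hx
  have hr : pvReach p i x := (pvReach_iff p i x hn hi).mpr hb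
  refine ⟨?_, hr⟩
  have hle := pvMs_le p i
  have hmono := pvMs_mono p i x hn hi hr
  omega

lemma pvT_le (p : List Int) (i : Nat) (hn : 0 < p.length) (hi : i < p.length) :
    pvT p i ≤ p.length := by
  obtain ⟨s, t, hst, htn, he⟩ := pvRepeat p i hn hi
  have hstop : pvStop p i t = true := by
    simp only [pvStop, Bool.or_eq_true, decide_eq_true_eq]
    exact Or.inr ⟨s, hst, he⟩
  unfold pvT
  exact le_trans (Nat.find_le (Or.inl hstop)) htn

lemma pvT_stop (p : List Int) (i : Nat) (hn : 0 < p.length) (hi : i < p.length) :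
    pvStop p i (pvT p i) = true := by
  have hle := pvT_le p i hn hi
  unfold pvT at *
  rcases Nat.find_spec (show ∃ t, pvStop p i t = true ∨ p.length + 1 ≤ t
    from ⟨p.length + 1, Or.inr le_rfl⟩) with h | h
  · exact h
  · omega

lemma pvT_not_stop (p : List Int) (i t : Nat) (ht : t < pvT p i) : pvStop p i t = false := by
  unfold pvT at ht
  have hmin := Nat.find_min (show ∃ t, pvStop p i t = true ∨ p.length + 1 ≤ t
    from ⟨p.length + 1, Or.inr le_rfl⟩) ht
  cases h : pvStop p i t
  · rfl
  · exact absurd (Or.inl h) hmin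

lemma pvA_claimA (p : List Int) (i t : Nat) (hn : 0 < p.length) (hi : i < p.length)
    (hmsi : pvMs p i = i) (ht : t < pvT p i) : pvMs p ((pvF p)^[t] i) = i := by
  have h1 := pvT_not_stop p i t ht
  simp only [pvStop, Bool.or_eq_false_iff, decide_eq_false_iff_not] at h1
  have h3 := pvMs_mono p i ((pvF p)^[t] i) hn hi ⟨t, rfl⟩
  rw [hmsi] at h3
  omega

lemma pvA_nodupT (p : List Int) (i a b : Nat) (hab : a < b) (hb : b < pvT p i) :
    (pvF p)^[a] i ≠ (pvF p)^[b] i := by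
  have h1 := pvT_not_stop p i b hb
  simp only [pvStop, Bool.or_eq_false_iff, decide_eq_false_iff_not] at h1
  intro he
  exact h1.2 ⟨a, hab, he⟩

lemma pvA_claimB (p : List Int) (i x : Nat) (hn : 0 < p.length) (hi : i < p.length)
    (hx : x < p.length) (hmsi : pvMs p i = i) (hmx : pvMs p x = i) :
    ∃ t < pvT p i, (pvF p)^[t] i = x := by
  have hbx : pvBReach p i x = true := by rw [← hmx]; exact pvMs_breach p x hn hx
  have hrx : pvReach p i x := (pvReach_iff p i x hn hi).mpr hbx
  have hK := Nat.find_spec (show ∃ k, (pvF p)^[k] i = x from hrx)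
  refine ⟨Nat.find (show ∃ k, (pvF p)^[k] i = x from hrx), ?_, hK⟩
  by_contra hTK
  push_neg at hTK
  have hstop := pvT_stop p i hn hi
  simp only [pvStop, Bool.or_eq_true, decide_eq_true_eq] at hstop
  rcases hstop with h | ⟨s, hs, he⟩
  · have hadd : Nat.find (show ∃ k, (pvF p)^[k] i = x from hrx) - pvT p i + pvT p i =
        Nat.find (show ∃ k, (pvF p)^[k] i = x from hrx) := by omega
    have hr2 : pvReach p ((pvF p)^[pvT p i] i) x :=
      ⟨Nat.find (show ∃ k, (pvF p)^[k] i = x from hrx) - pvT p i,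
        by rw [← Function.iterate_add_apply, hadd, hK]⟩
    have hnode : (pvF p)^[pvT p i] i < p.length := pvIter_lt p i _ hn hi
    have hmono := pvMs_mono p _ x hn hnode hr2
    rw [hmx] at hmono
    omega
  · obtain ⟨k, hk, he2⟩ := pvReach_lt_of_repeat p i x s (pvT p i) hs he hrx
    exact Nat.find_min (show ∃ k, (pvF p)^[k] i = x from hrx) (by omega) he2

lemma pvT_eq_c (p : List Int) (i : Nat) (hn : 0 < p.length) (hi : i < p.length)
    (hmsi : pvMs p i = i) : pvT p i = pvC p i := by
  have hWnodup : ((List.range (pvT p i)).map (fun t => (pvF p)^[t] i)).Nodup := by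
    apply List.Nodup.map_on _ List.nodup_range
    intro a ha b hb he
    simp only [List.mem_range] at ha hb
    by_contra hne
    rcases Nat.lt_or_ge a b with h | h
    · exact pvA_nodupT p i a b h hb he
    · exact pvA_nodupT p i b a (by omega) ha he.symm
  have hF : ((List.range p.length).filter (fun x => pvMs p x = i)).Nodup :=
    List.Nodup.filter _ List.nodup_range
  have hmem : ∀ x, x ∈ (List.range (pvT p i)).map (fun t => (pvF p)^[t] i) ↔
      x ∈ (List.range p.length).filter (fun x => pvMs p x = i) := by
    intro x
    simp only [List.mem_map, List.mem_range, List.mem_filter, decide_eq_true_eq]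
    constructor
    · rintro ⟨t, ht, rfl⟩
      exact ⟨pvIter_lt p i t hn hi, pvA_claimA p i t hn hi hmsi ht⟩
    · rintro ⟨hx, hmx⟩
      exact pvA_claimB p i x hn hi hx hmsi hmx
  have hperm := (List.perm_ext_iff_of_nodup hWnodup hF).mpr hmem
  have hlen := hperm.length_eq
  simpa [pvC] using hlen

lemma pvC_zero (p : List Int) (m : Nat) (hn : 0 < p.length) (hm : m < p.length)
    (h : pvMs p m < m) : pvC p m = 0 := by
  unfold pvC
  have hfil : (List.range p.length).filter (fun x => pvMs p x = m) = [] := by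
    apply List.filter_eq_nil_iff.mpr
    intro x hx
    simp only [List.mem_range] at hx
    simp only [decide_eq_true_eq]
    intro hmx
    have := (pvMs_eq_imp p x m hn hx hm hmx).1
    omega
  rw [hfil]
  rfl

lemma pre_getD (p : List Int) (hp : Pre_cycles_and_order p) (x : Nat) (hx : x < p.length) :
    -(p.length : Int) ≤ p.getD x 0 ∧ p.getD x 0 < (p.length : Int) := by
  have hmem : p.getD x 0 ∈ p := by
    rw [List.getD_eq_getElem p 0 hx]
    exact List.getElem_mem hx
  exact hp _ hmem

-- raw-value sequence: bounds and the cell each raw value addresses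
lemma pvX_cell (p : List Int) (hp : Pre_cycles_and_order p) (hn : 0 < p.length)
    (j : Nat) (hj : j < p.length) (t : Nat) :
    (PySem.Int.mod (pvX p j t) (p.length : Int)).toNat = (pvF p)^[t] j ∧
    -(p.length : Int) ≤ pvX p j t ∧ pvX p j t < (p.length : Int) := by
  cases t with
  | zero =>
    refine ⟨?_, by show -(p.length : Int) ≤ ((j : Nat) : Int); omega,
      by show ((j : Nat) : Int) < (p.length : Int); exact_mod_cast hj⟩
    show (PySem.Int.mod ((j : Nat) : Int) (p.length : Int)).toNat = j
    rw [pvMod_inrange _ _ hn (by omega) (by exact_mod_cast hj)]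
    split_ifs with h
    · omega
    · omega
  | succ t =>
    have hlt : (pvF p)^[t] j < p.length := pvIter_lt p j t hn hj
    have hb := pre_getD p hp ((pvF p)^[t] j) hlt
    refine ⟨?_, hb.1, hb.2⟩
    show (PySem.Int.mod (p.getD ((pvF p)^[t] j) 0) (p.length : Int)).toNat = (pvF p)^[t+1] j
    rw [Function.iterate_succ_apply']
    rfl

lemma pvX_cell_eq (p : List Int) (hp : Pre_cycles_and_order p) (hn : 0 < p.length)
    (j : Nat) (hj : j < p.length) (s t : Nat) (he : pvX p j s = pvX p j t) :
    (pvF p)^[s] j = (pvF p)^[t] j := by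
  have h1 := (pvX_cell p hp hn j hj s).1
  have h2 := (pvX_cell p hp hn j hj t).1
  rw [← h1, ← h2, he]

lemma pvTB_le (p : List Int) (hp : Pre_cycles_and_order p) (j : Nat) (hn : 0 < p.length)
    (hj : j < p.length) : pvTB p j ≤ p.length + 1 := by
  obtain ⟨s, t, hst, htn, he⟩ := pvRepeat p j hn hj
  have hraw : pvX p j (s+1) = pvX p j (t+1) := by
    show p.getD ((pvF p)^[s] j) 0 = p.getD ((pvF p)^[t] j) 0
    rw [he]
  have hstop : decide (∃ a < t+1, pvX p j a = pvX p j (t+1)) = true := by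
    simp only [decide_eq_true_eq]
    exact ⟨s+1, by omega, hraw⟩
  unfold pvTB
  exact le_trans (Nat.find_le (Or.inl hstop)) (by omega)

lemma pvTB_repeat (p : List Int) (hp : Pre_cycles_and_order p) (j : Nat) (hn : 0 < p.length)
    (hj : j < p.length) : ∃ s < pvTB p j, pvX p j s = pvX p j (pvTB p j) := by
  have hle := pvTB_le p hp j hn hj
  unfold pvTB at *
  rcases Nat.find_spec (show ∃ t, decide (∃ s < t, pvX p j s = pvX p j t) = true ∨
      p.length + 2 ≤ t from ⟨p.length + 2, Or.inr le_rfl⟩) with h | h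
  · simpa using h
  · omega

lemma pvTB_not (p : List Int) (j t : Nat) (ht : t < pvTB p j) :
    ¬ ∃ s < t, pvX p j s = pvX p j t := by
  unfold pvTB at ht
  have hmin := Nat.find_min (show ∃ t, decide (∃ s < t, pvX p j s = pvX p j t) = true ∨
      p.length + 2 ≤ t from ⟨p.length + 2, Or.inr le_rfl⟩) ht
  intro he
  exact hmin (Or.inl (by simpa using he))

lemma pvTB_reach (p : List Int) (hp : Pre_cycles_and_order p) (j y : Nat) (hn : 0 < p.length)
    (hj : j < p.length) : pvReach p j y ↔ ∃ k < pvTB p j, (pvF p)^[k] j = y := by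
  constructor
  · intro hr
    obtain ⟨s, hs, he⟩ := pvTB_repeat p hp j hn hj
    exact pvReach_lt_of_repeat p j y s (pvTB p j) hs (pvX_cell_eq p hp hn j hj s _ he) hr
  · rintro ⟨k, _, hk⟩
    exact ⟨k, hk⟩

lemma pyA_walk_spec (p : List Int) (hp : Pre_cycles_and_order p) (hn : 0 < p.length)
    (i : Nat) (hi : i < p.length) (hmsi : pvMs p i = i) :
    ∀ fuel t seen (jraw : Int), t ≤ pvT p i → pvT p i + 1 ≤ fuel + t →
    seen.length = p.length →
    (∀ x, x < p.length →
      seen.getD x false = (decide (pvMs p x < i) || decide (∃ s < t, (pvF p)^[s] i = x))) →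
    -(p.length : Int) ≤ jraw → jraw < (p.length : Int) →
    (PySem.Int.mod jraw (p.length : Int)).toNat = (pvF p)^[t] i →
    ((pyA_walk p fuel seen jraw (t : Int)).1.length = p.length ∧
     (∀ x, x < p.length → (pyA_walk p fuel seen jraw (t : Int)).1.getD x false =
        (decide (pvMs p x < i) || decide (∃ s < pvT p i, (pvF p)^[s] i = x))) ∧
     (pyA_walk p fuel seen jraw (t : Int)).2.2 = (pvT p i : Int)) := by
  intro fuel
  induction fuel with
  | zero =>
    intro t seen jraw ht hfuel _ _ _ _ _
    omega
  | succ fuel ih =>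
    intro t seen jraw ht hfuel hlen hseen hj1 hj2 hnode
    have hnlt : (pvF p)^[t] i < p.length := pvIter_lt p i t hn hi
    have hget : PySem.List.pyGet? seen jraw = some (seen.getD ((pvF p)^[t] i) false) := by
      rw [pyGet?_inrange seen jraw (by omega) (by rw [hlen]; exact hj1) (by
        rw [hlen]; exact hj2)]
      rw [show (PySem.Int.mod jraw (seen.length : Int)).toNat = (pvF p)^[t] i by
        rw [hlen]; exact hnode]
      rw [List.getElem?_eq_getElem (by omega), List.getD_eq_getElem seen false (by omega)]
    have hb : seen.getD ((pvF p)^[t] i) false = pvStop p i t := by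
      rw [hseen _ hnlt]; rfl
    by_cases hstop : pvStop p i t = true
    · have htT : t = pvT p i := by
        rcases Nat.lt_or_ge t (pvT p i) with h | h
        · rw [pvT_not_stop p i t h] at hstop; exact absurd hstop (by simp)
        · omega
      have heq : pyA_walk p (fuel+1) seen jraw (t : Int) = (seen, jraw, (t : Int)) := by
        simp only [pyA_walk, hget, hb, hstop]
        simp
      rw [heq]
      refine ⟨hlen, ?_, by rw [htT]⟩
      intro x hx
      rw [hseen x hx, htT]
    · have htlt : t < pvT p i := by
        rcases Nat.lt_or_ge t (pvT p i) with h | h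
        · exact h
        · have heq2 : t = pvT p i := by omega
          rw [heq2] at hstop
          exact absurd (pvT_stop p i hn hi) hstop
      have hset : PySem.List.pySetD seen jraw true = seen.set ((pvF p)^[t] i) true := by
        rw [pySetD_inrange seen jraw true (by omega) (by rw [hlen]; exact hj1) (by
          rw [hlen]; exact hj2)]
        rw [show (PySem.Int.mod jraw (seen.length : Int)).toNat = (pvF p)^[t] i by
          rw [hlen]; exact hnode]
    -- continue below
      have hvz := pre_getD p hp ((pvF p)^[t] i) hnlt
      have hpget : PySem.List.pyGet? p jraw = some (p.getD ((pvF p)^[t] i) 0) := by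
        rw [pyGet?_inrange p jraw hn hj1 hj2, hnode]
        rw [List.getElem?_eq_getElem hnlt, List.getD_eq_getElem p 0 hnlt]
      have hbf : seen.getD ((pvF p)^[t] i) false = false := by rw [hb]; simpa using hstop
      have heq : pyA_walk p (fuel+1) seen jraw (t : Int) =
          pyA_walk p fuel (seen.set ((pvF p)^[t] i) true) (p.getD ((pvF p)^[t] i) 0)
            ((t : Int) + 1) := by
        simp only [pyA_walk, hget, hbf, hpget, hset]
        simp
      have hcast : ((t : Int) + 1) = ((t + 1 : Nat) : Int) := by push_cast; ring
      have hnode' : (PySem.Int.mod (p.getD ((pvF p)^[t] i) 0) (p.length : Int)).toNat =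
          (pvF p)^[t+1] i := by
        rw [Function.iterate_succ_apply']
        rfl
      have hres := ih (t+1) (seen.set ((pvF p)^[t] i) true) (p.getD ((pvF p)^[t] i) 0)
        (by omega) (by omega) (by rw [List.length_set]; exact hlen)
        (by
          intro x hx
          by_cases hxe : x = (pvF p)^[t] i
          · subst hxe
            rw [List.getD_eq_getElem _ false (by simpa [hlen] using hnlt)]
            rw [List.getElem_set_self (by simpa [hlen] using hnlt)]
            have hex : decide (∃ s < t + 1, (pvF p)^[s] i = (pvF p)^[t] i) = true := by
              simp only [decide_eq_true_eq]
              exact ⟨t, by omega, rfl⟩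
            rw [hex, Bool.or_true]
          · rw [List.getD_eq_getElem _ false (by simpa [hlen] using hx)]
            rw [List.getElem_set_ne (by omega)]
            rw [← List.getD_eq_getElem seen false (by rw [hlen]; exact hx), hseen x hx]
            congr 1
            simp only [decide_eq_decide]
            constructor
            · rintro ⟨s, hs, he⟩
              exact ⟨s, by omega, he⟩
            · rintro ⟨s, hs, he⟩
              refine ⟨s, ?_, he⟩
              rcases Nat.lt_or_ge s t with h | h
              · exact h
              · have hst : s = t := by omega
                rw [hst] at he
                exact absurd he.symm hxe
          )
        hvz.1 hvz.2 hnode'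
      rw [heq, hcast]
      exact hres

lemma cast_mod_self (M n : Nat) (hMn : M < n) :
    (PySem.Int.mod (M : Int) (n : Int)).toNat = M := by
  rw [pvMod_inrange (M : Int) n (by omega) (by omega) (by exact_mod_cast hMn)]
  split_ifs with h
  · omega
  · omega

lemma pvLens_succ (p : List Int) (M : Nat) :
    pvLens p (M + 1) = pvLens p M ++
      (if ((pvC p M : Nat) : Int) > 1 then [((pvC p M : Nat) : Int)] else []) := by
  unfold pvLens
  rw [List.range_succ, List.map_append, List.filter_append]
  congr 1
  simp only [List.map_cons, List.map_nil, List.filter]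
  cases h : decide (((pvC p M : Nat) : Int) > 1)
  · rw [if_neg (by simpa using h)]
  · rw [if_pos (by simpa using h)]

lemma pyA_outer (p : List Int) (hp : Pre_cycles_and_order p) :
    ∀ M, M ≤ p.length →
    ((PySem.List.pyRange 0 (M : Int) 1).foldl (fun st i =>
      match PySem.List.pyGet? st.1 i with
      | none => st
      | some b =>
        if b then st
        else
          let w := pyA_walk p (p.length + 1) st.1 i 0
          (w.1, if w.2.2 > 1 then st.2 ++ [w.2.2] else st.2)
      ) (List.replicate p.length false, ([] : List Int))).1.length = p.length ∧
    (∀ x, x < p.length →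
      ((PySem.List.pyRange 0 (M : Int) 1).foldl (fun st i =>
      match PySem.List.pyGet? st.1 i with
      | none => st
      | some b =>
        if b then st
        else
          let w := pyA_walk p (p.length + 1) st.1 i 0
          (w.1, if w.2.2 > 1 then st.2 ++ [w.2.2] else st.2)
      ) (List.replicate p.length false, ([] : List Int))).1.getD x false = decide (pvMs p x < M)) ∧
    ((PySem.List.pyRange 0 (M : Int) 1).foldl (fun st i =>
      match PySem.List.pyGet? st.1 i with
      | none => st
      | some b =>
        if b then st
        else
          let w := pyA_walk p (p.length + 1) st.1 i 0
          (w.1, if w.2.2 > 1 then st.2 ++ [w.2.2] else st.2)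
      ) (List.replicate p.length false, ([] : List Int))).2 = pvLens p M := by
  intro M
  induction M with
  | zero =>
    intro _
    simp only [Nat.cast_zero, PySem.List.pyRange_one_eq_nil le_rfl, List.foldl_nil]
    refine ⟨by simp, ?_, by simp [pvLens]⟩
    intro x hx
    have hfalse : (List.replicate p.length false).getD x false = false := by
      rw [List.getD_eq_getElem _ false (by simpa using hx)]
      simp
    rw [hfalse]
    simp
  | succ M ih =>
    intro hM1
    have hM : M ≤ p.length := by omega
    have hMn : M < p.length := by omega
    have hn : 0 < p.length := by omega
    obtain ⟨ih1, ih2, ih3⟩ := ih hM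
    have hsplit : PySem.List.pyRange 0 ((M+1 : Nat) : Int) 1 =
        PySem.List.pyRange 0 (M : Int) 1 ++ [(M : Int)] := by
      push_cast
      exact PySem.List.pyRange_one_succ_right (by exact_mod_cast Nat.zero_le M)
    rw [hsplit, List.foldl_append, List.foldl_cons, List.foldl_nil]
    set st := (PySem.List.pyRange 0 (M : Int) 1).foldl (fun st i =>
      match PySem.List.pyGet? st.1 i with
      | none => st
      | some b =>
        if b then st
        else
          let w := pyA_walk p (p.length + 1) st.1 i 0
          (w.1, if w.2.2 > 1 then st.2 ++ [w.2.2] else st.2)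
      ) (List.replicate p.length false, ([] : List Int)) with hst
    have hget : PySem.List.pyGet? st.1 ((M : Nat) : Int) = some (st.1.getD M false) := by
      rw [PySem.List.pyGet?_natCast,
        List.getElem?_eq_getElem (by rw [ih1]; exact hMn),
        List.getD_eq_getElem _ false (by rw [ih1]; exact hMn)]
    have hb : st.1.getD M false = decide (pvMs p M < M) := ih2 M hMn
    by_cases hseen : pvMs p M < M
    · have hbt : st.1.getD M false = true := by rw [hb]; simpa using hseen
      rw [hget, hbt]
      simp only [if_true]
      refine ⟨ih1, ?_, ?_⟩
      · intro x hx
        rw [ih2 x hx]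
        simp only [decide_eq_decide]
        constructor
        · omega
        · intro h
          rcases Nat.lt_or_ge (pvMs p x) M with h2 | h2
          · exact h2
          · have hxM : pvMs p x = M := by omega
            have := (pvMs_eq_imp p x M hn hx hMn hxM).1
            omega
      · rw [ih3, pvLens_succ, pvC_zero p M hn hMn hseen]
        simp
    · have hmsM : pvMs p M = M := pvMs_self p M hseen
      have hbf : st.1.getD M false = false := by rw [hb]; simpa using hseen
      rw [hget, hbf]
      simp only [Bool.false_eq_true, if_false]
      have hw := pyA_walk_spec p hp hn M hMn hmsM (p.length + 1) 0 st.1 ((M : Nat) : Int)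
        (by omega) (by have := pvT_le p M hn hMn; omega) ih1
        (by
          intro x hx
          rw [ih2 x hx]
          simp)
        (by omega) (by exact_mod_cast hMn)
        (by rw [cast_mod_self M p.length hMn]; rfl)
      rw [show ((0 : Nat) : Int) = (0 : Int) by simp] at hw
      obtain ⟨hw1, hw2, hw3⟩ := hw
      refine ⟨hw1, ?_, ?_⟩
      · intro x hx
        rw [hw2 x hx, ← Bool.decide_or]
        simp only [decide_eq_decide]
        constructor
        · rintro (h | ⟨s, hs, he⟩)
          · omega
          · have := pvA_claimA p M s hn hMn hmsM hs
            rw [he] at this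
            omega
        · intro h
          rcases Nat.lt_or_ge (pvMs p x) M with h2 | h2
          · exact Or.inl h2
          · have hxM : pvMs p x = M := by omega
            exact Or.inr (pvA_claimB p M x hn hMn hx hmsM hxM)
      · rw [hw3, ih3, pvLens_succ, ← pvT_eq_c p M hn hMn hmsM]
        cases h : decide (((pvT p M : Nat) : Int) > 1)
        · rw [if_neg (by simpa using h), if_neg (by simpa using h)]
          simp
        · rw [if_pos (by simpa using h), if_pos (by simpa using h)]

lemma pvSet_add (s : PySem.Set Int) (x z : Int) :
    PySem.Set.contains (PySem.Set.add s x) z = (PySem.Set.contains s z || z == x) := by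
  simp only [PySem.Set.add, PySem.Set.contains]
  split_ifs with h
  · cases hzx : (z == x)
    · simp
    · have hz : z = x := by simpa using hzx
      subst hz
      simp only [List.contains_iff_mem] at h ⊢
      simp [h]
  · simp only [List.contains_append]
    cases hzx : (z == x)
    · have hz : ¬ z = x := by simpa using hzx
      simp [hz]
    · have hz : z = x := by simpa using hzx
      simp [hz]

lemma pyB_walk_spec (p : List Int) (hp : Pre_cycles_and_order p) (hn : 0 < p.length)
    (j : Nat) (hj : j < p.length) :
    ∀ fuel t visited m, t ≤ pvTB p j → pvTB p j + 1 ≤ fuel + t →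
    m.length = p.length →
    (∀ z : Int, PySem.Set.contains visited z = decide (∃ s < t, pvX p j s = z)) →
    ((pyB_walk p fuel visited m ((j : Nat) : Int) (pvX p j t)).length = p.length ∧
     ∀ y, y < p.length →
      (pyB_walk p fuel visited m ((j : Nat) : Int) (pvX p j t)).getD y 0 =
        if ∃ k < pvTB p j, t ≤ k ∧ (pvF p)^[k] j = y
        then (if ((j : Nat) : Int) < m.getD y 0 then ((j : Nat) : Int) else m.getD y 0)
        else m.getD y 0) := by
  intro fuel
  induction fuel with
  | zero =>
    intro t visited m ht hfuel _ _
    omega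
  | succ fuel ih =>
    intro t visited m ht hfuel hlen hvis
    have hcell := pvX_cell p hp hn j hj t
    have hnlt : (pvF p)^[t] j < p.length := pvIter_lt p j t hn hj
    have hcon : PySem.Set.contains visited (pvX p j t) =
        decide (∃ s < t, pvX p j s = pvX p j t) := hvis _
    by_cases hrep : ∃ s < t, pvX p j s = pvX p j t
    · have heq : pyB_walk p (fuel+1) visited m ((j:Nat):Int) (pvX p j t) = m := by
        simp only [pyB_walk, hcon, decide_eq_true hrep]
        simp
      have htTB : t = pvTB p j := by
        rcases Nat.lt_or_ge t (pvTB p j) with h | h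
        · exact absurd hrep (pvTB_not p j t h)
        · omega
      rw [heq]
      refine ⟨hlen, ?_⟩
      intro y hy
      have hcond : ¬ (∃ k < pvTB p j, t ≤ k ∧ (pvF p)^[k] j = y) := by
        rintro ⟨k, hk, htk, _⟩
        omega
      rw [if_neg hcond]
    · have htlt : t < pvTB p j := by
        rcases Nat.lt_or_ge t (pvTB p j) with h | h
        · exact h
        · have heq2 : t = pvTB p j := by omega
          obtain ⟨s, hs, he⟩ := pvTB_repeat p hp j hn hj
          exact absurd (show ∃ s < t, pvX p j s = pvX p j t by
            rw [heq2]; exact ⟨s, hs, he⟩) hrep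
      have hmget : PySem.List.pyGetD m (pvX p j t) 0 = m.getD ((pvF p)^[t] j) 0 := by
        show (PySem.List.pyGet? m (pvX p j t)).getD 0 = _
        rw [pyGet?_inrange m (pvX p j t) (by omega) (by rw [hlen]; exact hcell.2.1)
          (by rw [hlen]; exact hcell.2.2)]
        rw [show (PySem.Int.mod (pvX p j t) (m.length : Int)).toNat = (pvF p)^[t] j by
          rw [hlen]; exact hcell.1]
        rw [List.getElem?_eq_getElem (by omega), List.getD_eq_getElem m 0 (by omega)]
        rfl
      have hmset : PySem.List.pySetD m (pvX p j t) ((j:Nat):Int) =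
          m.set ((pvF p)^[t] j) ((j:Nat):Int) := by
        rw [pySetD_inrange m (pvX p j t) _ (by omega) (by rw [hlen]; exact hcell.2.1)
          (by rw [hlen]; exact hcell.2.2)]
        rw [show (PySem.Int.mod (pvX p j t) (m.length : Int)).toNat = (pvF p)^[t] j by
          rw [hlen]; exact hcell.1]
      have hpget : PySem.List.pyGet? p (pvX p j t) = some (pvX p j (t+1)) := by
        rw [pyGet?_inrange p (pvX p j t) hn hcell.2.1 hcell.2.2, hcell.1]
        rw [List.getElem?_eq_getElem hnlt]
        show some _ = some (p.getD ((pvF p)^[t] j) 0)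
        rw [List.getD_eq_getElem p 0 hnlt]
      have heq : pyB_walk p (fuel+1) visited m ((j:Nat):Int) (pvX p j t) =
          pyB_walk p fuel (PySem.Set.add visited (pvX p j t))
            (if ((j:Nat):Int) < m.getD ((pvF p)^[t] j) 0
              then m.set ((pvF p)^[t] j) ((j:Nat):Int) else m)
            ((j:Nat):Int) (pvX p j (t+1)) := by
        simp only [pyB_walk, hcon, decide_eq_false hrep, Bool.false_eq_true, if_false,
          hmget, hmset, hpget]
      have hm1len : (if ((j:Nat):Int) < m.getD ((pvF p)^[t] j) 0
          then m.set ((pvF p)^[t] j) ((j:Nat):Int) else m).length = p.length := by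
        split_ifs <;> simp [hlen]
      have hvis' : ∀ z, PySem.Set.contains (PySem.Set.add visited (pvX p j t)) z =
          decide (∃ s < t+1, pvX p j s = z) := by
        intro z
        rw [pvSet_add, hvis]
        have hiff : (∃ s < t+1, pvX p j s = z) ↔
            ((∃ s < t, pvX p j s = z) ∨ z = pvX p j t) := by
          constructor
          · rintro ⟨s, hs, he⟩
            rcases Nat.lt_or_ge s t with h | h
            · exact Or.inl ⟨s, h, he⟩
            · have : s = t := by omega
              subst this
              exact Or.inr he.symm
          · rintro (⟨s, hs, he⟩ | he)
            · exact ⟨s, by omega, he⟩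
            · exact ⟨t, by omega, he.symm⟩
        rw [decide_eq_decide.mpr hiff, Bool.decide_or]
        congr 1
      have hres := ih (t+1) (PySem.Set.add visited (pvX p j t))
        (if ((j:Nat):Int) < m.getD ((pvF p)^[t] j) 0
          then m.set ((pvF p)^[t] j) ((j:Nat):Int) else m)
        (by omega) (by omega) hm1len hvis'
      rw [heq]
      refine ⟨hres.1, ?_⟩
      intro y hy
      rw [hres.2 y hy]
      by_cases hye : y = (pvF p)^[t] j
      · subst hye
        have hm'y : (if ((j:Nat):Int) < m.getD ((pvF p)^[t] j) 0
            then m.set ((pvF p)^[t] j) ((j:Nat):Int) else m).getD ((pvF p)^[t] j) 0 =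
            if ((j:Nat):Int) < m.getD ((pvF p)^[t] j) 0 then ((j:Nat):Int)
            else m.getD ((pvF p)^[t] j) 0 := by
          split_ifs with h1
          · rw [List.getD_eq_getElem _ 0 (by simpa [hlen] using hnlt),
              List.getElem_set_self (by simpa [hlen] using hnlt)]
          · rfl
        have hgoal : (∃ k < pvTB p j, t ≤ k ∧ (pvF p)^[k] j = (pvF p)^[t] j) :=
          ⟨t, htlt, le_rfl, rfl⟩
        rw [if_pos hgoal, hm'y]
        split_ifs <;> omega
      · have hm1y : (if ((j:Nat):Int) < m.getD ((pvF p)^[t] j) 0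
            then m.set ((pvF p)^[t] j) ((j:Nat):Int) else m).getD y 0 = m.getD y 0 := by
          split_ifs
          · rw [List.getD_eq_getElem _ 0 (by simpa [hlen] using hy),
              List.getElem_set_ne (by omega),
              ← List.getD_eq_getElem m 0 (by rw [hlen]; exact hy)]
          · rfl
        rw [hm1y]
        have hiff2 : (∃ k < pvTB p j, t+1 ≤ k ∧ (pvF p)^[k] j = y) ↔
            (∃ k < pvTB p j, t ≤ k ∧ (pvF p)^[k] j = y) := by
          constructor
          · rintro ⟨k, hk, htk, he⟩
            exact ⟨k, hk, by omega, he⟩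
          · rintro ⟨k, hk, htk, he⟩
            refine ⟨k, hk, ?_, he⟩
            rcases Nat.lt_or_ge k (t+1) with h | h
            · have : k = t := by omega
              subst this
              exact absurd he.symm hye
            · omega
        by_cases hc : (∃ k < pvTB p j, t ≤ k ∧ (pvF p)^[k] j = y)
        · rw [if_pos (hiff2.mpr hc), if_pos hc]
        · rw [if_neg (fun hh => hc (hiff2.mp hh)), if_neg hc]

lemma pyB_outer (p : List Int) (hp : Pre_cycles_and_order p) :
    ∀ M, M ≤ p.length →
    ((PySem.List.pyRange 0 (M : Int) 1).foldl
      (fun m j => pyB_walk p (p.length + 2) PySem.Set.empty m j j)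
      (PySem.List.pyRange 0 (p.length : Int) 1)).length = p.length ∧
    (∀ y, y < p.length →
      ((PySem.List.pyRange 0 (M : Int) 1).foldl
      (fun m j => pyB_walk p (p.length + 2) PySem.Set.empty m j j)
      (PySem.List.pyRange 0 (p.length : Int) 1)).getD y 0 =
        if pvMs p y < M then ((pvMs p y : Nat) : Int) else (y : Int)) := by
  intro M
  induction M with
  | zero =>
    intro _
    simp only [Nat.cast_zero, PySem.List.pyRange_one_eq_nil le_rfl, List.foldl_nil]
    have hlen0 : (PySem.List.pyRange 0 (p.length : Int) 1).length = p.length := by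
      rw [PySem.List.length_pyRange_one]
      omega
    refine ⟨hlen0, ?_⟩
    intro y hy
    rw [List.getD_eq_getElem _ 0 (by rw [hlen0]; exact hy)]
    rw [PySem.List.getElem_pyRange_one]
    simp
  | succ M ih =>
    intro hM1
    have hM : M ≤ p.length := by omega
    have hMn : M < p.length := by omega
    have hn : 0 < p.length := by omega
    obtain ⟨ih1, ih2⟩ := ih hM
    have hsplit : PySem.List.pyRange 0 ((M+1 : Nat) : Int) 1 =
        PySem.List.pyRange 0 (M : Int) 1 ++ [(M : Int)] := by
      push_cast
      exact PySem.List.pyRange_one_succ_right (by exact_mod_cast Nat.zero_le M)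
    rw [hsplit, List.foldl_append, List.foldl_cons, List.foldl_nil]
    set m := (PySem.List.pyRange 0 (M : Int) 1).foldl
      (fun m j => pyB_walk p (p.length + 2) PySem.Set.empty m j j)
      (PySem.List.pyRange 0 (p.length : Int) 1) with hm
    have hw := pyB_walk_spec p hp hn M hMn (p.length + 2) 0 PySem.Set.empty m
      (by omega) (by have := pvTB_le p hp M hn hMn; omega) ih1
      (by
        intro z
        have h1 : PySem.Set.contains PySem.Set.empty z = false := rfl
        rw [h1]
        simp)
    rw [show pvX p M 0 = ((M : Nat) : Int) from rfl] at hw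
    obtain ⟨hw1, hw2⟩ := hw
    refine ⟨hw1, ?_⟩
    intro y hy
    rw [hw2 y hy, ih2 y hy]
    by_cases hreach : pvReach p M y
    · have hcond : ∃ k < pvTB p M, 0 ≤ k ∧ (pvF p)^[k] M = y := by
        obtain ⟨k, hk, he⟩ := (pvTB_reach p hp M y hn hMn).mp hreach
        exact ⟨k, hk, Nat.zero_le k, he⟩
      rw [if_pos hcond]
      have hmsle : pvMs p y ≤ M :=
        pvMs_min p M y ((pvReach_iff p M y hn hMn).mp hreach)
      have hmsy := pvMs_le p y
      split_ifs <;> omega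
    · have hcond : ¬ (∃ k < pvTB p M, 0 ≤ k ∧ (pvF p)^[k] M = y) := by
        rintro ⟨k, _, _, he⟩
        exact hreach ⟨k, he⟩
      rw [if_neg hcond]
      have hmsne : pvMs p y ≠ M := by
        intro hmsM
        have hb : pvBReach p M y = true := by
          rw [← hmsM]
          exact pvMs_breach p y hn hy
        exact hreach ((pvReach_iff p M y hn hMn).mpr hb)
      have hmsy := pvMs_le p y
      split_ifs <;> omega

lemma pyB_cnt (p : List Int) (m : List Int) (hm : m.length = p.length)
    (hmv : ∀ y, y < p.length → m.getD y 0 = ((pvMs p y : Nat) : Int)) :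
    ∀ M, M ≤ p.length →
    ((PySem.List.pyRange 0 (M : Int) 1).foldl (fun cnt x =>
      let mx := PySem.List.pyGetD m x 0
      PySem.List.pySetD cnt mx (PySem.List.pyGetD cnt mx 0 + 1)
      ) (List.replicate p.length (0 : Int))) =
    (List.range p.length).map
      (fun i => (((List.range M).filter (fun x => pvMs p x = i)).length : Int)) := by
  intro M
  induction M with
  | zero =>
    intro _
    simp only [Nat.cast_zero, PySem.List.pyRange_one_eq_nil le_rfl, List.foldl_nil]
    apply List.ext_getElem (by simp)
    intro i h1 h2
    simp
  | succ M ih =>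
    intro hM1
    have hMn : M < p.length := by omega
    have hn : 0 < p.length := by omega
    have hmslt : pvMs p M < p.length := lt_of_le_of_lt (pvMs_le p M) hMn
    have hsplit : PySem.List.pyRange 0 ((M+1 : Nat) : Int) 1 =
        PySem.List.pyRange 0 (M : Int) 1 ++ [(M : Int)] := by
      push_cast
      exact PySem.List.pyRange_one_succ_right (by exact_mod_cast Nat.zero_le M)
    rw [hsplit, List.foldl_append, List.foldl_cons, List.foldl_nil, ih (by omega)]
    have hmx : PySem.List.pyGetD m ((M : Nat) : Int) 0 = ((pvMs p M : Nat) : Int) := by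
      rw [PySem.List.pyGetD_natCast, hmv M hMn]
    simp only [hmx, PySem.List.pyGetD_natCast, PySem.List.pySetD_natCast]
    apply List.ext_getElem (by simp)
    intro i h1 h2
    have hin : i < p.length := by simpa using h2
    by_cases hi : i = pvMs p M
    · subst hi
      rw [List.getElem_set_self (by simpa using hmslt)]
      rw [List.getElem_map]
      rw [List.getD_eq_getElem _ 0 (by simpa using hmslt), List.getElem_map]
      simp only [List.getElem_range]
      have hstep : ((List.range (M+1)).filter (fun x => pvMs p x = pvMs p M)).length =
          ((List.range M).filter (fun x => pvMs p x = pvMs p M)).length + 1 := by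
        rw [List.range_succ, List.filter_append]
        simp
      rw [hstep]
      push_cast
      ring
    · rw [List.getElem_set_ne (by omega)]
      rw [List.getElem_map, List.getElem_map]
      simp only [List.getElem_range]
      have hne2 : ¬ pvMs p M = i := fun h => hi h.symm
      have hstep : (List.range (M+1)).filter (fun x => pvMs p x = i) =
          (List.range M).filter (fun x => pvMs p x = i) := by
        rw [List.range_succ, List.filter_append]
        simp [hne2]
      rw [hstep]

lemma cycles_A (p : List Int) (hp : Pre_cycles_and_order p) :
    cycles_and_order p = (pvLens p p.length,
      if pvLens p p.length = [] then 1 else pyMathLcm (pvLens p p.length)) := by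
  obtain ⟨_, _, h3⟩ := pyA_outer p hp p.length le_rfl
  unfold cycles_and_order
  simp only [h3]

lemma cycles_B (p : List Int) (hp : Pre_cycles_and_order p) :
    cycles_and_order_alt p = (pvLens p p.length,
      if pvLens p p.length = [] then 1 else pyMathLcm (pvLens p p.length)) := by
  obtain ⟨hb1, hb2⟩ := pyB_outer p hp p.length le_rfl
  have hmv : ∀ y, y < p.length →
      ((PySem.List.pyRange 0 ((p.length : Nat) : Int) 1).foldl
      (fun m j => pyB_walk p (p.length + 2) PySem.Set.empty m j j)
      (PySem.List.pyRange 0 (p.length : Int) 1)).getD y 0 = ((pvMs p y : Nat) : Int) := by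
    intro y hy
    rw [hb2 y hy, if_pos (lt_of_le_of_lt (pvMs_le p y) hy)]
  have hcnt := pyB_cnt p _ hb1 hmv p.length le_rfl
  unfold cycles_and_order_alt
  simp only [hcnt]
  simp [pvLens, pvC]

-- ===== VERDICT (by name: the statement is the Claim_ definition above) =====
theorem cycles_and_order_spec : Claim_equal_cycles_and_order := by
  intro p _hd hp
  unfold Spec_cycles_and_order
  rw [cycles_A p hp, cycles_B p hp]
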